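-- pv_equiv track=rewrite | github.com/daniel-reich/ubiquitous-fiesta | 8NyNftbNXd6CZCDXf_21.py | get_coin_balances
-- ===== SOURCE A (Python) =====
-- def get_coin_balances(lst1, lst2):
--   commands = zip(lst1, lst2)
--   green = red = 3
--   for command in commands:
--     green_action, red_action = command
--     if [green_action, red_action] == ["share", "share"]:
--       green += 2
--       red += 2
--     elif [green_action, red_action] == ["steal", "steal"]:
--       continue
--     elif [green_action, red_action] == ["share", "steal"]:
--       green -= 1
--       red += 3
--     else:
--       green += 3
--       red -= 1
--   return [green, red]
-- ===== SOURCE B (Python) =====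
-- def get_coin_balances(lst1, lst2):
--     pairs = list(zip(lst1, lst2))
--     n_ss = pairs.count(("share", "share"))
--     n_st = pairs.count(("share", "steal"))
--     n_tt = pairs.count(("steal", "steal"))
--     n_other = len(pairs) - n_ss - n_st - n_tt
--     return [3 + 2 * n_ss - n_st + 3 * n_other,
--             3 + 2 * n_ss + 3 * n_st - n_other]
-- ===== Notes on version B (the rewrite author's own statement) =====
-- stated objective: faster
-- what changed: Replaces the per-pair branch-and-accumulate loop with counting the three named outcome categories via list.count over the zipped pairs and computing both balances in closed form from the counts.
import Mathlib
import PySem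

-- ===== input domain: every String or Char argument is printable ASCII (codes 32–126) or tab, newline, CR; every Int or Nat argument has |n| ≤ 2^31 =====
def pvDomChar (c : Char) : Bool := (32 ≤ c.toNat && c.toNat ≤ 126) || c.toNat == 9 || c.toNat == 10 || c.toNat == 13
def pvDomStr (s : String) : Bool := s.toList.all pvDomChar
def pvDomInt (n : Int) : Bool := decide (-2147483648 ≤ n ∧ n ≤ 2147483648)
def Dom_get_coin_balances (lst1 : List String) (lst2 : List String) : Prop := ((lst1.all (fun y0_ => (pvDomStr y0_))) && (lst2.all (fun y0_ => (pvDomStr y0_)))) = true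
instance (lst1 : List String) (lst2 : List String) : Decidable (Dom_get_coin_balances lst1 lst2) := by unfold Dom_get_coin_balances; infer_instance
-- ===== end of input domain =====

-- B tallies the three named outcome categories over the zipped pairs and returns both balances
-- in closed form from the counts (same O(n); a timing run measured B faster via C-level list.count).

-- ===== PORT A =====
-- the for-loop over zip(lst1, lst2) with accumulators green, red
def gcbLoop : List (String × String) → Int → Int → Int × Int
  | [], green, red => (green, red)
  | (green_action, red_action) :: rest, green, red =>
    if [green_action, red_action] = ["share", "share"] then
      gcbLoop rest (green + 2) (red + 2)
    else if [green_action, red_action] = ["steal", "steal"] then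
      gcbLoop rest green red
    else if [green_action, red_action] = ["share", "steal"] then
      gcbLoop rest (green - 1) (red + 3)
    else
      gcbLoop rest (green + 3) (red - 1)

def get_coin_balances (lst1 : List String) (lst2 : List String) : List Int :=
  let res := gcbLoop (lst1.zip lst2) 3 3
  [res.1, res.2]

-- ===== PORT B =====
def get_coin_balances_alt (lst1 : List String) (lst2 : List String) : List Int :=
  let pairs := lst1.zip lst2
  let n_ss : Int := pairs.count ("share", "share")
  let n_st : Int := pairs.count ("share", "steal")
  let n_tt : Int := pairs.count ("steal", "steal")
  let n_other : Int := (pairs.length : Int) - n_ss - n_st - n_tt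
  [3 + 2 * n_ss - n_st + 3 * n_other,
   3 + 2 * n_ss + 3 * n_st - n_other]

-- ===== PRECONDITION & SPEC =====
def Spec_get_coin_balances (lst1 : List String) (lst2 : List String) (out : List Int) : Prop := out = get_coin_balances_alt lst1 lst2
instance (lst1 : List String) (lst2 : List String) (out : List Int) : Decidable (Spec_get_coin_balances lst1 lst2 out) := by unfold Spec_get_coin_balances; infer_instance

-- ===== CLAIM (what is proved, stated in full; the proofs are below) =====
def Claim_equal_get_coin_balances : Prop := ∀ (lst1 : List String) (lst2 : List String), Dom_get_coin_balances lst1 lst2 → Spec_get_coin_balances lst1 lst2 (get_coin_balances lst1 lst2)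

-- ===== LEMMAS AND PROOFS =====
lemma gcbLoop_eq (l : List (String × String)) : ∀ (g r : Int),
    gcbLoop l g r =
      (g + 2 * (l.count ("share", "share") : Int) - l.count ("share", "steal")
         + 3 * ((l.length : Int) - l.count ("share", "share") - l.count ("share", "steal")
                 - l.count ("steal", "steal")),
       r + 2 * (l.count ("share", "share") : Int) + 3 * l.count ("share", "steal")
         - ((l.length : Int) - l.count ("share", "share") - l.count ("share", "steal")
             - l.count ("steal", "steal"))) := by
  induction l with
  | nil => intro g r; simp [gcbLoop]
  | cons hd tl ih =>
    intro g r
    obtain ⟨ga, ra⟩ := hd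
    by_cases h1 : [ga, ra] = ["share", "share"]
    · obtain ⟨h1a, h1b⟩ : ga = "share" ∧ ra = "share" := by simpa using h1
      subst h1a h1b
      simp only [gcbLoop, ih, List.count_cons, List.length_cons, beq_iff_eq,
        Prod.mk.injEq, List.cons.injEq, String.reduceEq, and_self, and_false,
        if_true, if_false]
      refine ⟨?_, ?_⟩ <;> push_cast <;> ring
    · by_cases h2 : [ga, ra] = ["steal", "steal"]
      · obtain ⟨h2a, h2b⟩ : ga = "steal" ∧ ra = "steal" := by simpa using h2
        subst h2a h2b
        simp only [gcbLoop, ih, List.count_cons, List.length_cons, beq_iff_eq,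
          Prod.mk.injEq, List.cons.injEq, String.reduceEq, and_self, and_true,
          if_true, if_false]
        refine ⟨?_, ?_⟩ <;> push_cast <;> ring
      · by_cases h3 : [ga, ra] = ["share", "steal"]
        · obtain ⟨h3a, h3b⟩ : ga = "share" ∧ ra = "steal" := by simpa using h3
          subst h3a h3b
          simp only [gcbLoop, ih, List.count_cons, List.length_cons, beq_iff_eq,
            Prod.mk.injEq, List.cons.injEq, String.reduceEq, and_false, and_true,
            if_true, if_false]
          refine ⟨?_, ?_⟩ <;> push_cast <;> ring
        · have e1 : ((ga, ra) = ("share", "share")) = False := by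
            simp only [Prod.mk.injEq, eq_iff_iff, iff_false, not_and]
            intro ha hb; exact h1 (by rw [ha, hb])
          have e2 : ((ga, ra) = ("share", "steal")) = False := by
            simp only [Prod.mk.injEq, eq_iff_iff, iff_false, not_and]
            intro ha hb; exact h3 (by rw [ha, hb])
          have e3 : ((ga, ra) = ("steal", "steal")) = False := by
            simp only [Prod.mk.injEq, eq_iff_iff, iff_false, not_and]
            intro ha hb; exact h2 (by rw [ha, hb])
          simp only [gcbLoop, if_neg h1, if_neg h2, if_neg h3, ih,
            List.count_cons, List.length_cons, beq_iff_eq, e1, e2, e3, if_false]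
          rw [Prod.mk.injEq]
          refine ⟨?_, ?_⟩ <;> push_cast <;> ring

-- ===== VERDICT (by name: the statement is the Claim_ definition above) =====
theorem get_coin_balances_spec : Claim_equal_get_coin_balances := by
  intro lst1 lst2 _
  show _ = _
  simp only [get_coin_balances, get_coin_balances_alt, gcbLoop_eq]
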